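-- pv_equiv track=rewrite | github.com/odylith/odylith | src/odylith/runtime/orchestration/subagent_orchestrator.py | _shared_relative_directory_depth
-- ===== SOURCE A (Python) =====
-- from typing import Sequence
--
-- def _path_parts(path: str) -> list[str]:
--     return [part for part in path.split("/") if part]
--
-- def _relative_directory_parts(path: str) -> list[str]:
--     parts = _path_parts(path)
--     if len(parts) <= 2:
--         return []
--     return parts[1:-1]
--
-- def _shared_relative_directory_depth(paths: Sequence[str]) -> int:
--     realized = [_relative_directory_parts(path) for path in paths if path]
--     if len(realized) < 2:
--         return len(realized[0]) if realized else 0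
--     depth = 0
--     for tokens in zip(*realized, strict=False):
--         if len(set(tokens)) != 1:
--             break
--         depth += 1
--     return depth
-- ===== SOURCE B (Python) =====
-- def _path_parts(path: str) -> list[str]:
--     return [part for part in path.split("/") if part]
--
-- def _relative_directory_parts(path: str) -> list[str]:
--     parts = _path_parts(path)
--     if len(parts) <= 2:
--         return []
--     return parts[1:-1]
--
-- def _shared_relative_directory_depth(paths) -> int:
--     realized = [_relative_directory_parts(path) for path in paths if path]
--     if len(realized) < 2:
--         return len(realized[0]) if realized else 0
--     reference = realized[0]
--     depth = len(reference)
--     for other in realized[1:]: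
--         i = 0
--         while i < depth and i < len(other) and reference[i] == other[i]:
--             i += 1
--         depth = i
--     return depth
-- ===== Notes on version B (the rewrite author's own statement) =====
-- stated objective: alternative
-- what changed: Replaces the column-wise zip(*realized)+set scan with a running-minimum of pairwise common-prefix lengths against the first list.
import Mathlib
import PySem

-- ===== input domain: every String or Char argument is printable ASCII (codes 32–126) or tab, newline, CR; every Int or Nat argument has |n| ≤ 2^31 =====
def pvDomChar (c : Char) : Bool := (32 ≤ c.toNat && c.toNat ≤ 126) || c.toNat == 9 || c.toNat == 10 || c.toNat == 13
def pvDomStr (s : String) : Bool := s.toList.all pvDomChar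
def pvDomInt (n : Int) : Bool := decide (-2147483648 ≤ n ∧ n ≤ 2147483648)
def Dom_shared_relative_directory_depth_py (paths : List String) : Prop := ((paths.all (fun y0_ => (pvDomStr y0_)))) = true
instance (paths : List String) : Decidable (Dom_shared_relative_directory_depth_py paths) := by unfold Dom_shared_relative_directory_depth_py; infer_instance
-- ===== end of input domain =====

-- B replaces the column-wise zip(*realized)+set scan by a running minimum of pairwise
-- common-prefix lengths against the first list (objective: alternative decomposition).

-- ===== PORT A =====
-- _path_parts
def pathParts (path : String) : List String :=
  -- path.split("/"): split? is none only for sep = "", and "/" ≠ "", so getD is exact here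
  ((PySem.Str.split? path "/").getD []).filter (fun part => part ≠ "")

-- _relative_directory_parts
def relDirParts (path : String) : List String :=
  let parts := pathParts path
  if parts.length ≤ 2 then [] else PySem.List.slice parts (some 1) (some (-1))

-- zip(*realized) ported by hand: tuples while every list is nonempty (exact for ≥ 1 lists;
-- A only calls it with ≥ 2 lists)
def pyZipStar (ls : List (List String)) : List (List String) :=
  if h : ls.all (fun l => l ≠ []) ∧ ls ≠ [] then
    ls.map (fun l => l.headD "") :: pyZipStar (ls.map (fun l => l.tail))
  else []
termination_by (ls.headD []).length
decreasing_by
  obtain ⟨h1, h2⟩ := h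
  cases ls with
  | nil => exact absurd rfl h2
  | cons l rest =>
    simp only [List.map_cons, List.headD_cons]
    have hl : l ≠ [] := by
      have := h1; simp [List.all_eq_true] at this; exact this.1
    cases l with
    | nil => exact absurd rfl hl
    | cons a t => simp

-- the for-loop over zip(*realized) with its set test and break
def aLoop : List (List String) → Int
  | [] => 0
  | tokens :: rest =>
      if (PySem.Set.ofList tokens).length ≠ 1 then 0 else aLoop rest + 1

def shared_relative_directory_depth_py (paths : List String) : Int :=
  let realized := (paths.filter (fun p => p ≠ "")).map relDirParts
  if realized.length < 2 then
    (if realized ≠ [] then ((realized.headD []).length : Int) else 0)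
  else
    aLoop (pyZipStar realized)

-- ===== PORT B =====
-- the while loop: i while i < depth and i < len(other) and reference[i] == other[i]
def bWhile (reference other : List String) (depth : Int) (i : Int) : Int :=
  if h : i < depth ∧ i < (other.length : Int) ∧
      PySem.List.pyGet? reference i = PySem.List.pyGet? other i then
    bWhile reference other depth (i + 1)
  else i
termination_by (depth - i).toNat
decreasing_by omega

def shared_relative_directory_depth_py_alt (paths : List String) : Int :=
  let realized := (paths.filter (fun p => p ≠ "")).map relDirParts
  if realized.length < 2 then
    (if realized ≠ [] then ((realized.headD []).length : Int) else 0)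
  else
    let reference := realized.headD []
    realized.tail.foldl (fun depth other => bWhile reference other depth 0)
      (reference.length : Int)

-- ===== PRECONDITION & SPEC =====
def Spec_shared_relative_directory_depth_py (paths : List String) (out : Int) : Prop := out = shared_relative_directory_depth_py_alt paths
instance (paths : List String) (out : Int) : Decidable (Spec_shared_relative_directory_depth_py paths out) := by unfold Spec_shared_relative_directory_depth_py; infer_instance

-- ===== CLAIM (what is proved, stated in full; the proofs are below) =====
def Claim_equal_shared_relative_directory_depth_py : Prop := ∀ (paths : List String), Dom_shared_relative_directory_depth_py paths → Spec_shared_relative_directory_depth_py paths (shared_relative_directory_depth_py paths)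

-- ===== LEMMAS AND PROOFS =====

-- common-prefix length of two lists
def pfxN : List String → List String → Nat
  | _, [] => 0
  | [], _ => 0
  | a :: r, b :: o => if a = b then pfxN r o + 1 else 0

theorem bWhile_aux (reference other : List String) (n : Nat) :
    ∀ (d i : Nat), d ≤ reference.length → i ≤ d → d - i ≤ n →
    bWhile reference other (d : Int) (i : Int)
      = (i : Int) + (min (d - i) (pfxN (reference.drop i) (other.drop i)) : Nat) := by
  induction n with
  | zero =>
    intro d i hd hi hn
    have hid : i = d := by omega
    rw [bWhile]
    rw [dif_neg (by push_neg; intro h; exfalso; omega)]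
    subst hid
    simp
  | succ n ih =>
    intro d i hd hi hn
    rw [bWhile]
    by_cases h : (i : Int) < (d : Int) ∧ (i : Int) < (other.length : Int) ∧
        PySem.List.pyGet? reference (i : Int) = PySem.List.pyGet? other (i : Int)
    · rw [dif_pos h]
      obtain ⟨h1, h2, h3⟩ := h
      have h1' : i < d := by exact_mod_cast h1
      have h2' : i < other.length := by exact_mod_cast h2
      have hir : i < reference.length := by omega
      have hcall := ih d (i + 1) hd (by omega) (by omega)
      have hcast : (i : Int) + 1 = ((i + 1 : Nat) : Int) := by push_cast; ring
      rw [hcast, hcall]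
      have hdr : reference.drop i = reference[i] :: reference.drop (i + 1) :=
        List.drop_eq_getElem_cons hir
      have hdo : other.drop i = other[i] :: other.drop (i + 1) :=
        List.drop_eq_getElem_cons h2'
      have hget : reference[i] = other[i] := by
        rw [PySem.List.pyGet?_natCast, PySem.List.pyGet?_natCast] at h3
        simpa [List.getElem?_eq_getElem, hir, h2'] using h3
      rw [hdr, hdo, hget]
      have hpf : pfxN (other[i] :: reference.drop (i + 1)) (other[i] :: other.drop (i + 1))
          = pfxN (reference.drop (i + 1)) (other.drop (i + 1)) + 1 := by
        simp [pfxN]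
      rw [hpf]
      have : min (d - i) (pfxN (reference.drop (i + 1)) (other.drop (i + 1)) + 1)
          = min (d - (i + 1)) (pfxN (reference.drop (i + 1)) (other.drop (i + 1))) + 1 := by
        omega
      rw [this]
      push_cast
      ring
    · rw [dif_neg h]
      push_neg at h
      by_cases h1 : (i : Int) < (d : Int)
      · have h1' : i < d := by exact_mod_cast h1
        by_cases h2 : (i : Int) < (other.length : Int)
        · have h2' : i < other.length := by exact_mod_cast h2
          have h3 := h h1 h2
          have hir : i < reference.length := by omega
          have hdr : reference.drop i = reference[i] :: reference.drop (i + 1) :=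
            List.drop_eq_getElem_cons hir
          have hdo : other.drop i = other[i] :: other.drop (i + 1) :=
            List.drop_eq_getElem_cons h2'
          have hne : reference[i] ≠ other[i] := by
            intro he
            apply h3
            rw [PySem.List.pyGet?_natCast, PySem.List.pyGet?_natCast]
            simp [List.getElem?_eq_getElem, hir, h2', he]
          rw [hdr, hdo]
          have : pfxN (reference[i] :: reference.drop (i + 1)) (other[i] :: other.drop (i + 1)) = 0 := by
            simp [pfxN, hne]
          rw [this]
          simp
        · have h2' : other.length ≤ i := by omega
          rw [List.drop_eq_nil_of_le h2']
          have : pfxN (reference.drop i) [] = 0 := by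
            cases reference.drop i <;> simp [pfxN]
          rw [this]
          simp
      · have : i = d := by omega
        subst this
        simp

theorem bWhile_eq (reference other : List String) (d : Nat) (hd : d ≤ reference.length) :
    bWhile reference other (d : Int) 0 = (min d (pfxN reference other) : Nat) := by
  have := bWhile_aux reference other d d 0 hd (by omega) (by omega)
  simpa using this

theorem foldl_bWhile_eq (reference : List String) (rest : List (List String)) (d : Nat) (hd : d ≤ reference.length) :
    rest.foldl (fun depth other => bWhile reference other depth 0) (d : Int)
      = (rest.foldl (fun dep o => min dep (pfxN reference o)) d : Nat) := by
  induction rest generalizing d with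
  | nil => rfl
  | cons o rest ih =>
    simp only [List.foldl_cons]
    rw [bWhile_eq reference o d hd]
    exact ih (min d (pfxN reference o)) (by omega)

-- foldl of a running min starting at 0 stays 0
theorem foldl_min_zero {α : Type} (f : α → Nat) (l : List α) :
    l.foldl (fun dep o => min dep (f o)) 0 = 0 := by
  induction l with
  | nil => rfl
  | cons a l ih => simpa using ih

-- a zero anywhere forces the running min to 0
theorem foldl_min_zero_mem {α : Type} (f : α → Nat) (l : List α) (d0 : Nat)
    (h : ∃ o ∈ l, f o = 0) : l.foldl (fun dep o => min dep (f o)) d0 = 0 := by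
  induction l generalizing d0 with
  | nil => simp at h
  | cons a l ih =>
    simp only [List.foldl_cons]
    rcases h with ⟨o, ho, hfo⟩
    rcases List.mem_cons.mp ho with rfl | ho'
    · rw [hfo]
      simp [foldl_min_zero]
    · exact ih _ ⟨o, ho', hfo⟩

-- the running min commutes with +1 when every value shifts by 1
theorem foldl_min_succ {α : Type} (f g : α → Nat) (l : List α) (d0 : Nat)
    (h : ∀ o ∈ l, f o = g o + 1) :
    l.foldl (fun dep o => min dep (f o)) (d0 + 1)
      = l.foldl (fun dep o => min dep (g o)) d0 + 1 := by
  induction l generalizing d0 with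
  | nil => rfl
  | cons a l ih =>
    simp only [List.foldl_cons]
    rw [h a (List.mem_cons_self), (by omega : min (d0 + 1) (g a + 1) = min d0 (g a) + 1)]
    exact ih _ (fun o ho => h o (List.mem_cons_of_mem _ ho))

-- set(tokens) has one element when all tokens are equal
theorem setlen_all_eq (x : String) (xs : List String) (h : ∀ y ∈ xs, y = x) :
    (PySem.Set.ofList (x :: xs)).length = 1 := by
  have key : ∀ (l : List String), (∀ y ∈ l, y = x) → l.foldl PySem.Set.add [x] = [x] := by
    intro l
    induction l with
    | nil => intro _; rfl
    | cons a l ih =>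
      intro ha
      have : a = x := ha a (List.mem_cons_self)
      subst this
      simp only [List.foldl_cons]
      have : PySem.Set.add [a] a = [a] := by
        simp [PySem.Set.add, PySem.Set.contains]
      rw [this]
      exact ih (fun y hy => ha y (List.mem_cons_of_mem _ hy))
  have h0 : PySem.Set.ofList (x :: xs) = xs.foldl PySem.Set.add (PySem.Set.add PySem.Set.empty x) := rfl
  have h1 : PySem.Set.add PySem.Set.empty x = [x] := by
    simp [PySem.Set.add, PySem.Set.empty, PySem.Set.contains]
  rw [h0, h1, key xs h]
  rfl

-- two distinct members make the set length ≠ 1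
theorem setlen_ne_one (tokens : List String) (x y : String)
    (hx : x ∈ tokens) (hy : y ∈ tokens) (hxy : x ≠ y) :
    (PySem.Set.ofList tokens).length ≠ 1 := by
  intro hlen
  obtain ⟨z, hz⟩ := List.length_eq_one_iff.mp hlen
  have hx' : x ∈ PySem.Set.ofList tokens := (PySem.Set.mem_ofList tokens x).mpr hx
  have hy' : y ∈ PySem.Set.ofList tokens := (PySem.Set.mem_ofList tokens y).mpr hy
  rw [hz] at hx' hy'
  simp at hx' hy'
  exact hxy (hx'.trans hy'.symm)

theorem pyZipStar_of_mem_nil (ls : List (List String)) (h : [] ∈ ls) : pyZipStar ls = [] := by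
  rw [pyZipStar, dif_neg]
  intro hc
  obtain ⟨h1, -⟩ := hc
  rw [List.all_eq_true] at h1
  simpa using h1 [] h

theorem pyZipStar_cons (ls : List (List String)) (h1 : ∀ l ∈ ls, l ≠ []) (h2 : ls ≠ []) :
    pyZipStar ls = ls.map (fun l => l.headD "") :: pyZipStar (ls.map (fun l => l.tail)) := by
  rw [pyZipStar]
  rw [dif_pos ⟨by rw [List.all_eq_true]; intro l hl; simpa using h1 l hl, h2⟩]

theorem aLoop_eq (r : List String) (rest : List (List String)) :
    aLoop (pyZipStar (r :: rest))
      = (rest.foldl (fun dep o => min dep (pfxN r o)) r.length : Nat) := by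
  induction r generalizing rest with
  | nil =>
    rw [pyZipStar_of_mem_nil _ (List.mem_cons_self)]
    simp [aLoop, foldl_min_zero]
  | cons a r' ih =>
    by_cases hA : [] ∈ rest
    · rw [pyZipStar_of_mem_nil _ (List.mem_cons_of_mem _ hA)]
      simp only [aLoop]
      rw [foldl_min_zero_mem _ _ _ ⟨[], hA, by simp [pfxN]⟩]
      simp
    · by_cases hB : ∀ o ∈ rest, o.headD "" = a
      · -- every list starts with a: good first column, recurse
        have hne : ∀ l ∈ (a :: r') :: rest, l ≠ [] := by
          intro l hl
          rcases List.mem_cons.mp hl with rfl | hl'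
          · simp
          · intro he; exact hA (he ▸ hl')
        rw [pyZipStar_cons _ hne (by simp)]
        simp only [aLoop, List.map_cons, List.headD_cons, List.tail_cons]
        have hcol : (PySem.Set.ofList (a :: rest.map (fun l => l.headD ""))).length = 1 := by
          apply setlen_all_eq
          intro y hy
          obtain ⟨o, ho, rfl⟩ := List.mem_map.mp hy
          exact hB o ho
        rw [if_neg (by simpa using hcol)]
        rw [ih (rest.map (fun l => l.tail))]
        have hshift : rest.foldl (fun dep o => min dep (pfxN (a :: r') o)) (r'.length + 1)
            = rest.foldl (fun dep o => min dep (pfxN r' o.tail)) r'.length + 1 := by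
          apply foldl_min_succ
          intro o ho
          have hoe : o ≠ [] := fun he => hA (he ▸ ho)
          obtain ⟨b, o', rfl⟩ := List.exists_cons_of_ne_nil hoe
          have : b = a := by simpa using hB _ ho
          subst this
          simp [pfxN]
        have hmap : (rest.map (fun l => l.tail)).foldl (fun dep o => min dep (pfxN r' o)) r'.length
            = rest.foldl (fun dep o => min dep (pfxN r' o.tail)) r'.length := by
          rw [List.foldl_map]
        rw [hmap]
        simp only [List.length_cons]
        rw [hshift]
        push_cast
        ring
      · -- some list starts with b ≠ a: bad first column, both sides 0
        push_neg at hB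
        obtain ⟨o, ho, hob⟩ := hB
        have hoe : o ≠ [] := fun he => hA (he ▸ ho)
        obtain ⟨b, o', rfl⟩ := List.exists_cons_of_ne_nil hoe
        have hba : b ≠ a := by simpa using hob
        have hne : ∀ l ∈ (a :: r') :: rest, l ≠ [] := by
          intro l hl
          rcases List.mem_cons.mp hl with rfl | hl'
          · simp
          · intro he; exact hA (he ▸ hl')
        rw [pyZipStar_cons _ hne (by simp)]
        simp only [aLoop, List.map_cons, List.headD_cons]
        have hbmem : b ∈ a :: rest.map (fun l => l.headD "") := by
          apply List.mem_cons_of_mem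
          exact List.mem_map.mpr ⟨b :: o', ho, rfl⟩
        rw [if_pos (setlen_ne_one _ a b (List.mem_cons_self) hbmem (fun (he : a = b) => hba he.symm))]
        rw [foldl_min_zero_mem _ _ _ ⟨b :: o', ho, by simp [pfxN, Ne.symm hba]⟩]
        simp

-- ===== VERDICT (by name: the statement is the Claim_ definition above) =====
theorem shared_relative_directory_depth_py_spec : Claim_equal_shared_relative_directory_depth_py := by
  intro paths _
  unfold Spec_shared_relative_directory_depth_py
  unfold shared_relative_directory_depth_py shared_relative_directory_depth_py_alt
  cases hre : (paths.filter (fun p => p ≠ "")).map relDirParts with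
  | nil => simp
  | cons r rest =>
    by_cases h2 : (r :: rest).length < 2
    · have hnil : rest = [] := by
        cases rest with
        | nil => rfl
        | cons _ _ => simp at h2
      subst hnil; simp
    · simp only [h2, if_false, List.headD_cons, List.tail_cons]
      rw [aLoop_eq, foldl_bWhile_eq r rest r.length le_rfl]
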